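-- pv_equiv track=rewrite | github.com/MrBrantCode/unitest_baseline | mut_generate/mist_train_cf/cf_83945/solution.py | required_sequence
-- ===== SOURCE A (Python) =====
-- def required_sequence(n):
--     def generate_primes(n):
--         primes = []
--         candidates = list(range(2, n+1))
--
--         while len(candidates) != 0:
--             prime = candidates[0]
--             primes.append(prime)
--             candidates = [x for x in candidates if x % prime != 0]
--
--         return primes
--
--     primes = generate_primes(n)
--     result = []
--     for prime in primes:
--         if len(result) == 0 or prime > 3 * result[-1]:
--             result.append(prime)
--     return result
-- ===== SOURCE B (Python) =====
-- def required_sequence(n):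
--     # One pass over 2..n: trial-divide each number only up to its square root
--     # and greedily select it on the fly when it exceeds 3x the last pick.
--     def is_prime(x):
--         d = 2
--         while d * d <= x:
--             if x % d == 0:
--                 return False
--             d += 1
--         return x >= 2
--
--     result = []
--     for x in range(2, n + 1):
--         if is_prime(x) and (not result or x > 3 * result[-1]):
--             result.append(x)
--     return result
-- ===== Notes on version B (the rewrite author's own statement) =====
-- stated objective: faster
-- what changed: Replaces the repeated whole-list filtering sieve plus a second greedy pass with a single pass over 2..n that trial-divides each number only up to its square root and selects greedily on the fly.
import Mathlib
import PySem

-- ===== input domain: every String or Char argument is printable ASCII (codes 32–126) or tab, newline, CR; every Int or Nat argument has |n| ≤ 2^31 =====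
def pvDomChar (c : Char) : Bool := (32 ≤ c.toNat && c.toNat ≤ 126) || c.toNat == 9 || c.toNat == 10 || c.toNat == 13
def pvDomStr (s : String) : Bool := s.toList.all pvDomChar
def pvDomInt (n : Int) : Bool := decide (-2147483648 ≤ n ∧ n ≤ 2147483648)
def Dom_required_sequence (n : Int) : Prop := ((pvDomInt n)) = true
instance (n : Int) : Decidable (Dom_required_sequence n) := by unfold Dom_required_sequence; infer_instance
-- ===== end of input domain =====

-- B replaces A's repeated whole-list filtering sieve + second greedy pass by a single
-- pass over 2..n with trial division up to √x and on-the-fly greedy selection (faster).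

-- ===== PORT A =====
-- while len(candidates) != 0: prime = candidates[0]; primes.append(prime);
--   candidates = [x for x in candidates if x % prime != 0]
def genLoop (primes candidates : List Int) : List Int :=
  match candidates with
  | [] => primes
  | p :: t =>
      genLoop (primes ++ [p]) ((p :: t).filter (fun x => !(PySem.Int.mod x p == 0)))
termination_by candidates.length
decreasing_by
  have h : PySem.Int.mod p p = 0 := (PySem.Int.mod_eq_zero_iff_dvd p p).mpr dvd_rfl
  simp only [List.filter_cons, h]
  simp only [beq_self_eq_true, Bool.not_true, List.length_cons]
  exact Nat.lt_succ_of_le (List.length_filter_le _ _)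

def required_sequence (n : Int) : List Int :=
  let primes := genLoop [] (PySem.List.pyRange 2 (n + 1) 1)
  -- result[-1] is read only when result is nonempty; pyGetD's default is unreachable
  primes.foldl (fun result prime =>
    if result.length == 0 || decide (3 * PySem.List.pyGetD result (-1) 0 < prime)
    then result ++ [prime] else result) []

-- ===== PORT B =====
-- while d * d <= x: if x % d == 0: return False; d += 1
def isPrimeLoop (x d : Int) : Bool :=
  if d * d ≤ x then
    if PySem.Int.mod x d == 0 then false else isPrimeLoop x (d + 1)
  else decide (2 ≤ x)
termination_by (x + 1 - d).toNat
decreasing_by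
  rename_i h
  have hdle : d ≤ x := by nlinarith [sq_nonneg d, h]
  omega

def isPrimeB (x : Int) : Bool := isPrimeLoop x 2

def required_sequence_alt (n : Int) : List Int :=
  (PySem.List.pyRange 2 (n + 1) 1).foldl (fun result x =>
    if isPrimeB x && (result.length == 0 || decide (3 * PySem.List.pyGetD result (-1) 0 < x))
    then result ++ [x] else result) []

-- ===== PRECONDITION & SPEC =====
def Spec_required_sequence (n : Int) (out : List Int) : Prop := out = required_sequence_alt n
instance (n : Int) (out : List Int) : Decidable (Spec_required_sequence n out) := by unfold Spec_required_sequence; infer_instance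

-- ===== CLAIM (what is proved, stated in full; the proofs are below) =====
def Claim_equal_required_sequence : Prop := ∀ (n : Int), Dom_required_sequence n → Spec_required_sequence n (required_sequence n)

-- ===== LEMMAS AND PROOFS =====

-- "x has no proper divisor ≥ 2": the primality predicate both programs compute.
def Pr (x : Int) : Prop := 2 ≤ x ∧ ∀ d : Int, 2 ≤ d → d < x → ¬ d ∣ x

-- a divisor below √x exists iff a proper divisor exists
lemma Pr_iff_sqrt (x : Int) :
    Pr x ↔ (2 ≤ x ∧ ∀ e : Int, 2 ≤ e → e * e ≤ x → ¬ e ∣ x) := by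
  constructor
  · rintro ⟨h2, h⟩
    refine ⟨h2, fun e he hee hdvd => h e he (by nlinarith) hdvd⟩
  · rintro ⟨h2, h⟩
    refine ⟨h2, fun d hd hdx hdvd => ?_⟩
    obtain ⟨e, rfl⟩ := hdvd
    have he1 : 1 ≤ e := by nlinarith
    have he2 : 2 ≤ e := by
      rcases (by omega : e = 1 ∨ 2 ≤ e) with rfl | h2e
      · omega
      · exact h2e
    rcases le_total d e with hle | hle
    · exact h d hd (by nlinarith) ⟨e, rfl⟩
    · exact h e he2 (by nlinarith) ⟨d, mul_comm d e⟩

lemma isPrimeLoop_spec (x d : Int) (hd : 2 ≤ d) :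
    isPrimeLoop x d = true ↔ (2 ≤ x ∧ ∀ e : Int, d ≤ e → e * e ≤ x → ¬ e ∣ x) := by
  rw [isPrimeLoop]
  by_cases h : d * d ≤ x
  · rw [if_pos h]
    by_cases hmod : PySem.Int.mod x d == 0
    · rw [if_pos hmod]
      have hdvd : d ∣ x := (PySem.Int.mod_eq_zero_iff_dvd x d).mp (by simpa using hmod)
      simp only [Bool.false_eq_true, false_iff]
      rintro ⟨-, hall⟩
      exact hall d le_rfl h hdvd
    · rw [if_neg hmod]
      rw [isPrimeLoop_spec x (d + 1) (by omega)]
      constructor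
      · rintro ⟨h2, hall⟩
        refine ⟨h2, fun e he hee hdvd => ?_⟩
        rcases (by omega : e = d ∨ d + 1 ≤ e) with rfl | he'
        · exact hmod (by simp [(PySem.Int.mod_eq_zero_iff_dvd x e).mpr hdvd])
        · exact hall e he' hee hdvd
      · rintro ⟨h2, hall⟩
        exact ⟨h2, fun e he hee hdvd => hall e (by omega) hee hdvd⟩
  · rw [if_neg h]
    simp only [decide_eq_true_eq]
    constructor
    · intro h2; exact ⟨h2, fun e he hee _ => h (by nlinarith)⟩
    · rintro ⟨h2, -⟩; exact h2
termination_by (x + 1 - d).toNat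
decreasing_by
  have hdle : d ≤ x := by nlinarith [sq_nonneg d, h]
  omega

lemma isPrimeB_iff (x : Int) : isPrimeB x = true ↔ Pr x := by
  rw [isPrimeB, isPrimeLoop_spec x 2 le_rfl, Pr_iff_sqrt]

-- every non-Pr number ≥ 2 has a Pr (prime) proper divisor
lemma exists_Pr_divisor (x : Int) (h2 : 2 ≤ x) (hnp : ¬ Pr x) :
    ∃ p : Int, 2 ≤ p ∧ p < x ∧ p ∣ x ∧ Pr p := by
  have hx : x.toNat ≠ 1 := by omega
  obtain ⟨d, hd2, hdx, hdvd⟩ : ∃ d : Int, 2 ≤ d ∧ d < x ∧ d ∣ x := by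
    by_contra hc
    exact hnp ⟨h2, fun d hd hdx hdvd => hc ⟨d, hd, hdx, hdvd⟩⟩
  set m := x.toNat.minFac with hm
  have hmp : m.Prime := Nat.minFac_prime hx
  have hmdvd : (m : Int) ∣ x := by
    have : (m : Int) ∣ (x.toNat : Int) := Int.natCast_dvd_natCast.mpr (Nat.minFac_dvd _)
    rwa [Int.toNat_of_nonneg (by omega)] at this
  have hdnat : d.toNat ∣ x.toNat := by
    have hd' : d.toNat = d.natAbs := by omega
    have hx' : x.toNat = x.natAbs := by omega
    rw [hd', hx']
    exact Int.natAbs_dvd_natAbs.mpr hdvd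
  have hmle : m ≤ d.toNat := Nat.minFac_le_of_dvd (by omega) hdnat
  refine ⟨(m : Int), by exact_mod_cast hmp.two_le, by omega, hmdvd, by exact_mod_cast hmp.two_le, ?_⟩
  intro c hc hcm hcdvd
  have : c.natAbs ∣ m := by
    have := Int.natAbs_dvd_natAbs.mpr hcdvd
    simpa using this
  rcases (Nat.Prime.eq_one_or_self_of_dvd hmp _ this) with h1 | h1 <;> omega

lemma filter_keeps_Pr (p : Int) (hp2 : 2 ≤ p) (t : List Int)
    (hlt : ∀ x ∈ t, p < x) :
    t.filter isPrimeB = (t.filter (fun x => !(PySem.Int.mod x p == 0))).filter isPrimeB := by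
  rw [List.filter_filter]
  apply List.filter_congr
  intro x hx
  cases hB : isPrimeB x
  · simp
  · have hPr : Pr x := (isPrimeB_iff x).mp hB
    have hnd : ¬ p ∣ x := fun hdvd => hPr.2 p hp2 (hlt x hx) hdvd
    have : PySem.Int.mod x p ≠ 0 := fun h => hnd ((PySem.Int.mod_eq_zero_iff_dvd x p).mp h)
    simp [this]

lemma genLoop_eq : ∀ primes c : List Int, List.Pairwise (· < ·) c →
    (∀ x ∈ c, 2 ≤ x) →
    (∀ x ∈ c, ¬ Pr x → ∃ p ∈ c, p ∣ x ∧ p < x ∧ Pr p) →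
    genLoop primes c = primes ++ c.filter isPrimeB := by
  intro primes c
  induction primes, c using genLoop.induct with
  | case1 primes => intro _ _ _; simp [genLoop]
  | case2 primes p t ih =>
      intro hs h2 hcl
      have hp2 : 2 ≤ p := h2 p List.mem_cons_self
      have hmodpp : PySem.Int.mod p p = 0 := (PySem.Int.mod_eq_zero_iff_dvd p p).mpr dvd_rfl
      have hlt : ∀ x ∈ t, p < x := fun x hx => (List.pairwise_cons.mp hs).1 x hx
      have hPrp : Pr p := by
        by_contra hnp
        obtain ⟨q, hq, hqdvd, hqlt, -⟩ := hcl p List.mem_cons_self hnp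
        rcases List.mem_cons.mp hq with rfl | hq
        · omega
        · exact absurd (hlt q hq) (by omega)
      set f : Int → Bool := fun x => !(PySem.Int.mod x p == 0) with hf
      have hfc : (p :: t).filter f = t.filter f := by
        simp [hf, hmodpp]
      have hmemf : ∀ x, x ∈ (p :: t).filter f → x ∈ t := by
        intro x hx
        rw [hfc] at hx
        exact (List.mem_filter.mp hx).1
      have hnotdvd : ∀ x, x ∈ (p :: t).filter f → ¬ p ∣ x := by
        intro x hx hd
        have := (List.mem_filter.mp hx).2
        simp only [hf, Bool.not_eq_true', beq_eq_false_iff_ne, ne_eq] at this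
        exact this ((PySem.Int.mod_eq_zero_iff_dvd x p).mpr hd)
      rw [genLoop]
      rw [ih ((List.pairwise_cons.mp hs).2.filter f |>.imp_of_mem (fun _ _ => id) |> (hfc ▸ ·))
          (fun x hx => h2 x (List.mem_cons_of_mem p (hmemf x hx))) ?closure]
      case closure =>
        intro x hx hnp
        have hxt : x ∈ t := hmemf x hx
        obtain ⟨q, hq, hqdvd, hqlt, hqPr⟩ := hcl x (List.mem_cons_of_mem p hxt) hnp
        have hpx : ¬ p ∣ x := hnotdvd x hx
        have hqp : q ≠ p := fun h => hpx (h ▸ hqdvd)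
        have hqt : q ∈ t := by
          rcases List.mem_cons.mp hq with rfl | h
          · exact absurd rfl hqp
          · exact h
        have hpq : ¬ p ∣ q := by
          intro hd
          have hq2 : 2 ≤ q := hqPr.1
          have hple : p ≤ q := Int.le_of_dvd (by omega) hd
          rcases (by omega : p = q ∨ p < q) with rfl | hplt
          · exact hpx hqdvd
          · exact hqPr.2 p hp2 hplt hd
        refine ⟨q, ?_, hqdvd, hqlt, hqPr⟩
        rw [hfc]
        refine List.mem_filter.mpr ⟨hqt, ?_⟩
        simp only [hf, Bool.not_eq_true', beq_eq_false_iff_ne, ne_eq]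
        exact fun h => hpq ((PySem.Int.mod_eq_zero_iff_dvd q p).mp h)
      -- primes ++ [p] ++ ((p::t).filter f).filter isPrimeB = primes ++ (p::t).filter isPrimeB
      rw [hfc, ← filter_keeps_Pr p hp2 t hlt]
      rw [List.filter_cons, if_pos (by simpa using (isPrimeB_iff p).mpr hPrp)]
      simp

lemma foldl_if_filter (g : List Int → Int → List Int) (pb : Int → Bool) :
    ∀ (xs : List Int) (init : List Int),
      xs.foldl (fun acc x => if pb x then g acc x else acc) init
        = (xs.filter pb).foldl g init := by
  intro xs
  induction xs with
  | nil => intro init; rfl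
  | cons x t ih =>
      intro init
      cases h : pb x <;> simp [h, List.foldl_cons, ih]

-- ===== VERDICT (by name: the statement is the Claim_ definition above) =====
theorem required_sequence_spec : Claim_equal_required_sequence := by
  intro n _
  unfold Spec_required_sequence required_sequence required_sequence_alt
  set R := PySem.List.pyRange 2 (n + 1) 1 with hR
  set step : List Int → Int → List Int := fun result prime =>
    if result.length == 0 || decide (3 * PySem.List.pyGetD result (-1) 0 < prime)
    then result ++ [prime] else result with hstep
  have hmem : ∀ x ∈ R, 2 ≤ x ∧ x < n + 1 := by
    intro x hx
    exact (PySem.List.mem_pyRange_one).mp hx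
  have hgen : genLoop [] R = R.filter isPrimeB := by
    rw [genLoop_eq [] R (PySem.List.pairwise_lt_pyRange_one 2 (n + 1))
      (fun x hx => (hmem x hx).1) ?_]
    · simp
    · intro x hx hnp
      obtain ⟨p, hp2, hpx, hpd, hpPr⟩ := exists_Pr_divisor x (hmem x hx).1 hnp
      exact ⟨p, (PySem.List.mem_pyRange_one).mpr ⟨hp2, by have := (hmem x hx).2; omega⟩, hpd, hpx, hpPr⟩
  have hfuse : R.foldl (fun result x =>
      if isPrimeB x && (result.length == 0 || decide (3 * PySem.List.pyGetD result (-1) 0 < x))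
      then result ++ [x] else result) []
      = (R.filter isPrimeB).foldl step [] := by
    have hfun : (fun (result : List Int) (x : Int) =>
        if isPrimeB x && (result.length == 0 || decide (3 * PySem.List.pyGetD result (-1) 0 < x))
        then result ++ [x] else result)
        = fun result x => if isPrimeB x then step result x else result := by
      funext acc x
      cases isPrimeB x <;> simp [hstep]
    rw [hfun, foldl_if_filter step isPrimeB R []]
  simp only [hgen]
  rw [hfuse]
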